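-- pv_equiv track=rewrite | github.com/grnydawn/topcli | topcli/util.py | name_match
-- ===== SOURCE A (Python) =====
-- def name_match(pat, names):
--     match = []
--     p = pat.split(".")
--     for name in names:
--         n = name.split(".")
--         if len(p) > len(n):
--             return []
--         for a, b in zip(p, n[:len(p)]):
--             if a != b:
--                 return []
--         match.append(name)
--     return match
-- ===== SOURCE B (Python) =====
-- def name_match(pat, names):
--     # No splitting at all: a name's dotted components start with pat's
--     # components iff the name equals pat or starts with pat + "." as a string.
--     names = list(names)
--     pref = pat + "."
--     if all(name == pat or name.startswith(pref) for name in names):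
--         return names
--     return []
-- ===== Notes on version B (the rewrite author's own statement) =====
-- stated objective: simpler
-- what changed: A splits pat and every name on '.' and compares component lists with nested loops and early returns; B never splits at all: it tests the single string condition 'name == pat or name.startswith(pat + ".")' (equivalent to dotted-component prefix) over the materialized list and returns it wholesale or [].
import Mathlib
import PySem

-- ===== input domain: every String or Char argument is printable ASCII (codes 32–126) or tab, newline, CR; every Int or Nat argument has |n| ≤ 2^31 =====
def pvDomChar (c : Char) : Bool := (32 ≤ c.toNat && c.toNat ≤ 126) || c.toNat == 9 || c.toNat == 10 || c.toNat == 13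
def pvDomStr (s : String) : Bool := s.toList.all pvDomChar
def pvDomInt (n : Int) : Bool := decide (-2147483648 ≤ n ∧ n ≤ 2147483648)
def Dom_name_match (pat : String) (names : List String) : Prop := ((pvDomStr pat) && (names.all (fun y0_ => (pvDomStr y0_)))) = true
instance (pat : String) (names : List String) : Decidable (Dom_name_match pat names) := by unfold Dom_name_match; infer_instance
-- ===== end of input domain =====

-- B replaces A's split-into-components comparison with a pure string-prefix test
-- (name == pat or name startswith pat + "."), with no splitting at all: simpler.

-- ===== PORT A =====
-- s.split(".") — sep is the non-empty literal ".", so split? always returns some; getD [] is exact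
def pySplitDot (s : String) : List String := (PySem.Str.split? s ".").getD []

-- inner loop: 'for a, b in zip(p, n[:len(p)]): if a != b: return []' — true means no early return
def nmInner : List (String × String) → Bool
  | [] => true
  | (a, b) :: rest => if a ≠ b then false else nmInner rest

-- outer loop over names with accumulator 'match'; [] models the early 'return []'
def nmLoop (p : List String) (mtch : List String) : List String → List String
  | [] => mtch
  | name :: rest =>
    let n := pySplitDot name
    if p.length > n.length then []
    else if nmInner (p.zip (PySem.List.slice n none (some (p.length : Int)))) = false then []
    else nmLoop p (mtch ++ [name]) rest

def name_match (pat : String) (names : List String) : List String :=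
  nmLoop (pySplitDot pat) [] names

-- ===== PORT B =====
def name_match_alt (pat : String) (names : List String) : List String :=
  let pref := pat ++ "."
  if names.all (fun name => name == pat || PySem.Str.startswith name pref)
  then names else []

-- ===== PRECONDITION & SPEC =====
def Spec_name_match (pat : String) (names : List String) (out : List String) : Prop := out = name_match_alt pat names
instance (pat : String) (names : List String) (out : List String) : Decidable (Spec_name_match pat names out) := by unfold Spec_name_match; infer_instance

-- ===== CLAIM (what is proved, stated in full; the proofs are below) =====
def Claim_equal_name_match : Prop := ∀ (pat : String) (names : List String), Dom_name_match pat names → Spec_name_match pat names (name_match pat names)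

-- ===== LEMMAS AND PROOFS =====

-- prepend a prefix to the first piece (used to characterise splitOn's accumulator)
def headPre (pre : List Char) : List (List Char) → List (List Char)
  | [] => [pre]
  | h :: t => (pre ++ h) :: t

-- structural recursion computing Python's s.split(".") on char lists
def splitDot : List Char → List (List Char)
  | [] => [[]]
  | c :: rest => if c = '.' then [] :: splitDot rest else headPre [c] (splitDot rest)

lemma splitDot_ne_nil (l : List Char) : splitDot l ≠ [] := by
  cases l with
  | nil => simp [splitDot]
  | cons c rest =>
    simp only [splitDot]
    split
    · simp
    · cases h : splitDot rest <;> simp [headPre]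

lemma headPre_nil_of_ne (l : List (List Char)) (h : l ≠ []) : headPre [] l = l := by
  cases l with
  | nil => exact absurd rfl h
  | cons a t => simp [headPre]

lemma headPre_headPre (x y : List Char) (l : List (List Char)) :
    headPre x (headPre y l) = headPre (x ++ y) l := by
  cases l <;> simp [headPre]

lemma go_eq_splitDot (fuel : Nat) (l cur : List Char) (acc : List (List Char))
    (hf : l.length < fuel) :
    PySem.Chars.splitOn.go ['.'] fuel l cur acc = acc.reverse ++ headPre cur.reverse (splitDot l) := by
  induction fuel generalizing l cur acc with
  | zero => omega
  | succ f ih =>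
    cases l with
    | nil =>
      simp [PySem.Chars.splitOn.go, splitDot, headPre]
    | cons c rest =>
      simp only [PySem.Chars.splitOn.go]
      by_cases hc : c = '.'
      · subst hc
        have hpre : List.isPrefixOf ['.'] ('.' :: rest) = true := by
          simp [List.isPrefixOf]
        simp only [hpre, if_true]
        have hdrop : List.drop (['.'] : List Char).length ('.' :: rest) = rest := by simp
        rw [hdrop, ih rest [] ((cur.reverse) :: acc) (by simp at hf ⊢; omega)]
        rw [show ([] : List Char).reverse = [] from rfl,
          headPre_nil_of_ne _ (splitDot_ne_nil rest)]
        simp [splitDot, headPre]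
      · have hpre : List.isPrefixOf ['.'] (c :: rest) = false := by
          simp [List.isPrefixOf]
          exact fun h => absurd h.symm hc
        simp only [hpre, Bool.false_eq_true, if_false]
        rw [ih rest (c :: cur) acc (by simp at hf ⊢; omega)]
        simp only [splitDot, if_neg hc, List.reverse_cons]
        rw [headPre_headPre]

lemma splitOn_eq_splitDot (l : List Char) :
    PySem.Chars.splitOn l ['.'] = splitDot l := by
  unfold PySem.Chars.splitOn
  rw [go_eq_splitDot l.length.succ l [] [] (Nat.lt_succ_self _)]
  simp [headPre_nil_of_ne _ (splitDot_ne_nil l)]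

lemma pySplitDot_eq (s : String) :
    pySplitDot s = (splitDot s.toList).map String.ofList := by
  unfold pySplitDot
  simp [PySem.Str.split?, PySem.Chars.split?, splitOn_eq_splitDot]

-- the heart of the equivalence: component-list prefix ⟺ string equality or string prefix with "."
lemma splitDot_prefix_iff (s t : List Char) :
    splitDot s <+: splitDot t ↔ (s = t ∨ (s ++ ['.']) <+: t) := by
  induction s generalizing t with
  | nil =>
    cases t with
    | nil => simp [splitDot]
    | cons c ts =>
      simp only [splitDot]
      by_cases hc : c = '.'
      · subst hc
        simp [List.cons_prefix_cons]
      · cases h : splitDot ts with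
        | nil => exact absurd h (splitDot_ne_nil ts)
        | cons hd tl =>
          simp [headPre, List.cons_prefix_cons, hc, Ne.symm hc]
  | cons a s ih =>
    by_cases ha : a = '.'
    · subst ha
      cases t with
      | nil =>
        constructor
        · intro hp
          have hlen := hp.length_le
          cases hs : splitDot s with
          | nil => exact absurd hs (splitDot_ne_nil s)
          | cons hd tl => simp [splitDot, hs] at hlen
        · rintro (h | h) <;> simp at h
      | cons c ts =>
        by_cases hc : c = '.'
        · subst hc
          simp only [splitDot, if_true, List.cons_prefix_cons]
          rw [ih ts]
          simp [List.cons_prefix_cons]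
        · cases h : splitDot ts with
          | nil => exact absurd h (splitDot_ne_nil ts)
          | cons hd tl =>
            simp [splitDot, headPre, h, List.cons_prefix_cons, hc, Ne.symm hc]
    · cases t with
      | nil =>
        cases hs : splitDot s with
        | nil => exact absurd hs (splitDot_ne_nil s)
        | cons hd tl =>
          simp [splitDot, if_neg ha, hs, headPre, List.cons_prefix_cons]
      | cons c ts =>
        by_cases hc : c = '.'
        · subst hc
          cases hs : splitDot s with
          | nil => exact absurd hs (splitDot_ne_nil s)
          | cons hd tl =>
            simp [splitDot, hs, headPre, List.cons_prefix_cons, ha]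
      -- c ≠ '.'
        · cases hs : splitDot s with
          | nil => exact absurd hs (splitDot_ne_nil s)
          | cons hd tl =>
            cases ht : splitDot ts with
            | nil => exact absurd ht (splitDot_ne_nil ts)
            | cons hd' tl' =>
              have key := ih ts
              rw [hs, ht] at key
              simp only [splitDot, if_neg ha, if_neg hc, hs, ht, headPre,
                List.cons_prefix_cons, List.cons_append, List.nil_append,
                List.cons.injEq]
              constructor
              · rintro ⟨⟨hac, hhd⟩, htl⟩
                subst hac
                rcases key.mp (by rw [hhd]; exact List.cons_prefix_cons.mpr ⟨rfl, htl⟩) with h | h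
                · exact Or.inl ⟨rfl, h⟩
                · exact Or.inr ⟨rfl, h⟩
              · rintro (⟨hac, hst⟩ | ⟨hac, hp⟩)
                · subst hac; subst hst
                  have hh := hs.symm.trans ht
                  injection hh with h1 h2
                  exact ⟨⟨rfl, h1⟩, h2 ▸ List.prefix_refl _⟩
                · subst hac
                  have := key.mpr (Or.inr hp)
                  rcases List.cons_prefix_cons.mp this with ⟨h1, h2⟩
                  exact ⟨⟨rfl, h1⟩, h2⟩

-- injectivity of String.ofList lifts list prefix through the map
lemma map_ofList_prefix_iff (a b : List (List Char)) :
    a.map String.ofList <+: b.map String.ofList ↔ a <+: b := by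
  constructor
  · intro h
    rw [List.prefix_iff_eq_take] at h ⊢
    rw [List.length_map, ← List.map_take] at h
    have hinj : Function.Injective String.ofList := by
      intro x y hxy
      have := congrArg String.toList hxy
      simpa using this
    exact List.map_injective_iff.mpr hinj h
  · exact fun h => h.map _

-- A's two guards (length check + pairwise zip scan) pass iff the take-equality holds
lemma nm_inner_eq (p n : List String) :
    ((decide (p.length ≤ n.length)) && nmInner (p.zip (n.take p.length))) = (n.take p.length == p) := by
  induction p generalizing n with
  | nil => simp [nmInner]
  | cons a p' ih =>
    cases n with
    | nil => simp [nmInner]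
    | cons b n' =>
      simp only [List.length_cons, List.take_succ_cons, List.zip_cons_cons, nmInner]
      by_cases hab : a = b
      · subst hab
        simpa using ih n'
      · simp [hab, Ne.symm hab]

-- per-name: A's pass condition equals B's boolean test
lemma per_name_eq (pat name : String) :
    ((decide ((pySplitDot pat).length ≤ (pySplitDot name).length)) &&
      nmInner ((pySplitDot pat).zip
        (PySem.List.slice (pySplitDot name) none (some ((pySplitDot pat).length : Int)))))
    = (name == pat || PySem.Str.startswith name (pat ++ ".")) := by
  have hs : PySem.List.slice (pySplitDot name) none (some ((pySplitDot pat).length : Int))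
      = (pySplitDot name).take (pySplitDot pat).length :=
    PySem.List.slice_to_natCast _ _
  rw [hs, nm_inner_eq]
  have lhs_iff : ((pySplitDot name).take (pySplitDot pat).length == pySplitDot pat) = true
      ↔ pySplitDot pat <+: pySplitDot name := by
    rw [beq_iff_eq]
    constructor
    · intro h
      rw [List.prefix_iff_eq_take]
      exact h.symm
    · intro h
      exact (List.prefix_iff_eq_take.mp h).symm
  have rhs_iff : (name == pat || PySem.Str.startswith name (pat ++ ".")) = true
      ↔ pySplitDot pat <+: pySplitDot name := by
    rw [pySplitDot_eq, pySplitDot_eq, map_ofList_prefix_iff, splitDot_prefix_iff]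
    simp only [Bool.or_eq_true, beq_iff_eq, PySem.Str.startswith_eq,
      PySem.Chars.startswith_iff]
    constructor
    · rintro (h | h)
      · subst h; exact Or.inl rfl
      · right
        simpa using h
    · rintro (h | h)
      · left
        exact String.ext h.symm
      · right
        simpa using h
  exact Bool.eq_iff_iff.mpr (lhs_iff.trans rhs_iff.symm)

lemma nm_loop_eq (pat : String) (names mtch : List String) :
    nmLoop (pySplitDot pat) mtch names =
      if names.all (fun name => name == pat || PySem.Str.startswith name (pat ++ "."))
      then mtch ++ names else [] := by
  induction names generalizing mtch with
  | nil => simp [nmLoop]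
  | cons name rest ih =>
    have key := per_name_eq pat name
    simp only [nmLoop, List.all_cons]
    rcases Bool.eq_false_or_eq_true (name == pat || PySem.Str.startswith name (pat ++ ".")) with h | h
    · rw [h] at key
      simp only [h, Bool.true_and]
      rcases Bool.and_eq_true_iff.mp key with ⟨hlen, hin⟩
      have hlen' : ¬ (pySplitDot pat).length > (pySplitDot name).length :=
        Nat.not_lt.mpr (of_decide_eq_true hlen)
      rw [if_neg hlen', if_neg (by simp only [hin]; simp), ih]
      simp
    · rw [h] at key
      simp only [h, Bool.false_and, Bool.false_eq_true, if_false]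
      rcases Bool.and_eq_false_iff.mp key with hlen | hin
      · have : (pySplitDot pat).length > (pySplitDot name).length := by
          by_contra hc
          simp [Nat.le_of_not_lt hc] at hlen
        simp [this]
      · split <;> rfl

-- ===== VERDICT (by name: the statement is the Claim_ definition above) =====
theorem name_match_spec : Claim_equal_name_match := by
  intro pat names _
  unfold Spec_name_match name_match name_match_alt
  simpa using nm_loop_eq pat names []
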